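-- pv_equiv track=rewrite | github.com/Dr0ckman/10-de-juliador | configurar-carpetas-update/main.py | limpiarDatoQuery
-- ===== SOURCE A (Python) =====
-- def limpiarDatoQuery(datoQuery):
--     word = ""
--
--     for character in str(datoQuery):
--         if character == "(" or character == ")" or character == "," or character == "'":
--             character = ""
--         word += character
--
--     datoQuery = word
--     return datoQuery
-- ===== SOURCE B (Python) =====
-- def limpiarDatoQuery(datoQuery):
--     return str(datoQuery).replace("(", "").replace(")", "").replace(",", "").replace("'", "")
-- ===== Notes on version B (the rewrite author's own statement) =====
-- stated objective: idiomatic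
-- what changed: Replaces the explicit per-character accumulation loop with four chained whole-string str.replace passes, one per removed character.
import Mathlib
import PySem

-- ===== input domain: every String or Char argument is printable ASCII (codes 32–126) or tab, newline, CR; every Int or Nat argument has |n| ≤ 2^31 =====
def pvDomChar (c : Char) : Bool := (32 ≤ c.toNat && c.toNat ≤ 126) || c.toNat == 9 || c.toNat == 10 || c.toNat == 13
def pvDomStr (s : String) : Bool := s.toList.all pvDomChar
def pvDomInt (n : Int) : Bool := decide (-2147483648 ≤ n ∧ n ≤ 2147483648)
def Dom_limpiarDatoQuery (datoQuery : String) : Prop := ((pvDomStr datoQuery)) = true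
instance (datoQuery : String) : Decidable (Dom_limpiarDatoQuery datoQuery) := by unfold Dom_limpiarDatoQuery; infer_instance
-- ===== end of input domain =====

-- B replaces A's single character-filtering accumulation loop by four chained whole-string replace passes (idiomatic; return value only).

-- ===== PORT A =====
-- loop: word += character, with character blanked when it is one of ( ) , '
def limpiarDatoQuery (datoQuery : String) : String :=
  let word :=
    datoQuery.toList.foldl (fun word character =>
      let character :=
        if character == '(' || character == ')' || character == ',' || character == '\'' then ""
        else String.ofList [character]
      word ++ character) ""
  word

-- ===== PORT B =====
-- four chained str.replace passes, each removing one character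
def limpiarDatoQuery_alt (datoQuery : String) : String :=
  PySem.Str.replace (PySem.Str.replace (PySem.Str.replace (PySem.Str.replace datoQuery "(" "") ")" "") "," "") "'" ""

-- ===== PRECONDITION & SPEC =====
def Spec_limpiarDatoQuery (datoQuery : String) (out : String) : Prop := out = limpiarDatoQuery_alt datoQuery
instance (datoQuery : String) (out : String) : Decidable (Spec_limpiarDatoQuery datoQuery out) := by unfold Spec_limpiarDatoQuery; infer_instance

-- ===== CLAIM (what is proved, stated in full; the proofs are below) =====
def Claim_equal_limpiarDatoQuery : Prop := ∀ (datoQuery : String), Dom_limpiarDatoQuery datoQuery → Spec_limpiarDatoQuery datoQuery (limpiarDatoQuery datoQuery)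

-- ===== LEMMAS AND PROOFS =====

-- replace.go with a single-character pattern and empty replacement filters that character out
theorem replace_go_single (d : Char) : ∀ (fuel : Nat) (l acc : List Char), l.length ≤ fuel →
    PySem.Chars.replace.go [d] [] fuel l acc = acc.reverse ++ l.filter (fun c => !(c == d)) := by
  intro fuel
  induction fuel with
  | zero =>
    intro l acc h
    have : l = [] := List.length_eq_zero_iff.mp (Nat.le_zero.mp h)
    subst this
    simp [PySem.Chars.replace.go]
  | succ n ih =>
    intro l acc h
    cases l with
    | nil => simp [PySem.Chars.replace.go]
    | cons c t =>
      simp only [PySem.Chars.replace.go]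
      by_cases hc : c = d
      · subst hc
        have hpre : List.isPrefixOf [c] (c :: t) = true := by simp [List.isPrefixOf]
        rw [if_pos hpre]
        simp only [List.length_cons] at h
        have := ih t acc (by omega)
        simpa [List.filter] using this
      · have hpre : List.isPrefixOf [d] (c :: t) = false := by
          simp [List.isPrefixOf, hc]
          exact fun hh => hc hh.symm
        rw [if_neg (by simp [hpre])]
        simp only [List.length_cons] at h
        have := ih t (c :: acc) (by omega)
        rw [this]
        have hcd : (c == d) = false := by simp [hc]
        simp [List.filter_cons, hcd]

theorem replace_single (d : Char) (l : List Char) :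
    PySem.Chars.replace l [d] [] = l.filter (fun c => !(c == d)) := by
  simp only [PySem.Chars.replace, List.isEmpty]
  exact replace_go_single d l.length l [] (le_refl _)

theorem loopA_toList (l : List Char) : ∀ (w : String),
    (l.foldl (fun word character =>
      let character :=
        if character == '(' || character == ')' || character == ',' || character == '\'' then ""
        else String.ofList [character]
      word ++ character) w).toList
    = w.toList ++ l.filter (fun c => !(c == '(' || c == ')' || c == ',' || c == '\'')) := by
  induction l with
  | nil => intro w; simp
  | cons c t ih =>
    intro w
    simp only [List.foldl_cons]
    rw [ih]
    by_cases hc : (c == '(' || c == ')' || c == ',' || c == '\'') = true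
    · have hp : (!(c == '(') && !(c == ')') && !(c == ',') && !(c == '\'')) = false := by
        revert hc
        cases c == '(' <;> cases c == ')' <;> cases c == ',' <;> cases c == '\'' <;> simp
      simp [String.toList_ofList, List.filter_cons, hp, hc]
    · have hp : (!(c == '(') && !(c == ')') && !(c == ',') && !(c == '\'')) = true := by
        revert hc
        cases c == '(' <;> cases c == ')' <;> cases c == ',' <;> cases c == '\'' <;> simp
      simp [String.toList_ofList, List.filter_cons, hp, hc]

-- ===== VERDICT (by name: the statement is the Claim_ definition above) =====
theorem limpiarDatoQuery_spec : Claim_equal_limpiarDatoQuery := by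
  intro s _
  unfold Spec_limpiarDatoQuery limpiarDatoQuery limpiarDatoQuery_alt
  apply String.toList_injective  -- compare via toList
  simp only [PySem.Str.toList_replace]
  rw [loopA_toList]
  show _ = PySem.Chars.replace (PySem.Chars.replace (PySem.Chars.replace (PySem.Chars.replace s.toList ['('] []) [')'] []) [','] []) ['\''] []
  rw [replace_single, replace_single, replace_single, replace_single]
  simp only [List.filter_filter, String.toList_empty, List.nil_append]
  apply List.filter_congr
  intro c _
  cases h1 : c == '(' <;> cases h2 : c == ')' <;> cases h3 : c == ',' <;> cases h4 : c == '\'' <;>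
    simp [h1, h2, h3, h4]
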